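-- pv_equiv track=rewrite | github.com/harshanj07/CN | e2_arun.py | double_par
-- ===== SOURCE A (Python) =====
-- def singel_par(data,p):
--     c=data.count('1')
--     if p==1:
--         if c%2==1:
--             data.append('0')
--         else:
--             data.append('1')
--     else:
--         if c%2==0:
--             data.append('0')
--         else:
--             data.append('1')
--     return data
--
-- def double_par(data,l,p):
--     colpar=[]
--     for i in range(l):
--         c=0
--         for j in data:
--             if j[i]=='1':
--                 c=c+1
--         if p==1:
--             if c%2==1:
--                 colpar.append('0')
--             else:
--                 colpar.append('1')
--         else:
--             if c%2==0:
--                 colpar.append('0')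
--             else:
--                 colpar.append('1')
--
--     colpar=singel_par(colpar,p)
--     data.append(colpar)
--     return data
-- ===== SOURCE B (Python) =====
-- def double_par(data, l, p):
--     # One pass over the rows, maintaining a per-column XOR (parity) vector,
--     # instead of rescanning all rows for each column.
--     par = [False] * max(l, 0)
--     for row in data:
--         par = [x != (ch == '1') for x, ch in zip(par, row)]
--     def bit(x):
--         return '0' if x == (p == 1) else '1'
--     colpar = [bit(x) for x in par]
--     colpar.append(bit(colpar.count('1') % 2 == 1))
--     data.append(colpar)
--     return data
-- ===== Notes on version B (the rewrite author's own statement) =====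
-- stated objective: alternative
-- what changed: A rescans all rows for every column (column-major nested loops counting '1's); B makes a single pass over the rows maintaining a per-column XOR parity vector and derives the parity row (and its trailing row-parity bit) from that vector with one shared p-polarity bit function.
import Mathlib
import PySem

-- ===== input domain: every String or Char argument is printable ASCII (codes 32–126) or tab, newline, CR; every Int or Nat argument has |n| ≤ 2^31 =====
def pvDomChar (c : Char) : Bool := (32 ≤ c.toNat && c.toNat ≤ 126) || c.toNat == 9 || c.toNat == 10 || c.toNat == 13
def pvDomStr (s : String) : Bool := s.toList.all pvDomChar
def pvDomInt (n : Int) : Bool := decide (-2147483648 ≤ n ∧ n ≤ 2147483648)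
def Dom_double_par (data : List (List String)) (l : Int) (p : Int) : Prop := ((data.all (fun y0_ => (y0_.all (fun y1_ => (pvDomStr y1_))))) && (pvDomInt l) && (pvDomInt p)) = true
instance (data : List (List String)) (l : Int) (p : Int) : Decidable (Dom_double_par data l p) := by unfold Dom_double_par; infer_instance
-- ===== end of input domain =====

-- B replaces A's per-column rescan of all rows by a single pass over the rows
-- maintaining a per-column parity (XOR) vector (objective: alternative decomposition).
-- Equivalence is about the RETURN value only (both Pythons also append the parity row to `data` in place).

-- ===== PORT A =====
def singel_par (data : List String) (p : Int) : List String :=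
  let c := PySem.List.count data "1"
  if p == 1 then
    (if c % 2 == 1 then data ++ ["0"] else data ++ ["1"])
  else
    (if c % 2 == 0 then data ++ ["0"] else data ++ ["1"])

def double_par (data : List (List String)) (l : Int) (p : Int) : List (List String) :=
  let colpar := (PySem.List.pyRange 0 l 1).foldl (fun colpar i =>
    let c := data.foldl (fun c j => if PySem.List.pyGetD j i "" == "1" then c + 1 else c) (0 : Int)
    if p == 1 then
      (if c % 2 == 1 then colpar ++ ["0"] else colpar ++ ["1"])
    else
      (if c % 2 == 0 then colpar ++ ["0"] else colpar ++ ["1"])) ([] : List String)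
  let colpar := singel_par colpar p
  data ++ [colpar]

-- ===== PORT B =====
def pvBit (p : Int) (x : Bool) : String := if x == (p == 1) then "0" else "1"

def double_par_alt (data : List (List String)) (l : Int) (p : Int) : List (List String) :=
  let par := data.foldl
    (fun par row => List.zipWith (fun x ch => x != (ch == "1")) par row)
    (List.replicate (max l 0).toNat false)
  let colpar := par.map (pvBit p)
  let colpar := colpar ++ [pvBit p (PySem.List.count colpar "1" % 2 == 1)]
  data ++ [colpar]

-- ===== PRECONDITION & SPEC =====
-- Pre_ excludes exactly the inputs where A raises IndexError: some row shorter than l (with l > 0).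
def Pre_double_par (data : List (List String)) (l : Int) (p : Int) : Prop :=
  ∀ row ∈ data, l ≤ (row.length : Int)
instance (data : List (List String)) (l : Int) (p : Int) : Decidable (Pre_double_par data l p) := by
  unfold Pre_double_par; infer_instance

def pvWitness_double_par : List (List String) × Int × Int := ([["1", "0"], ["0", "0"]], 2, 1)

def Spec_double_par (data : List (List String)) (l : Int) (p : Int) (out : List (List String)) : Prop := out = double_par_alt data l p
instance (data : List (List String)) (l : Int) (p : Int) (out : List (List String)) : Decidable (Spec_double_par data l p out) := by unfold Spec_double_par; infer_instance

-- ===== CLAIM (what is proved, stated in full; the proofs are below) =====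
def Claim_equal_double_par : Prop := ∀ (data : List (List String)) (l : Int) (p : Int), Dom_double_par data l p → Pre_double_par data l p → Spec_double_par data l p (double_par data l p)

-- ===== LEMMAS AND PROOFS =====

-- the per-column '1'-count of A, and the per-column XOR of B
def pvCnt (data : List (List String)) (i : Int) : Int :=
  data.foldl (fun c j => if PySem.List.pyGetD j i "" == "1" then c + 1 else c) (0 : Int)

def pvXor (data : List (List String)) (k : Nat) (b : Bool) : Bool :=
  data.foldl (fun x row => x != (row.getD k "" == "1")) b

-- singel_par in terms of the shared bit function
lemma singel_par_eq (xs : List String) (p : Int) :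
    singel_par xs p = xs ++ [pvBit p (PySem.List.count xs "1" % 2 == 1)] := by
  have h : PySem.List.count xs "1" % 2 = 0 ∨ PySem.List.count xs "1" % 2 = 1 := by omega
  simp only [singel_par, pvBit]
  rcases h with h | h <;> split_ifs with h1 h2 <;> simp_all

-- A's column loop builds exactly the map of pvBit ∘ parity-of-count over the range
lemma acolpar_eq_map (data : List (List String)) (l p : Int) :
    (PySem.List.pyRange 0 l 1).foldl (fun colpar i =>
      let c := data.foldl (fun c j => if PySem.List.pyGetD j i "" == "1" then c + 1 else c) (0 : Int)
      if p == 1 then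
        (if c % 2 == 1 then colpar ++ ["0"] else colpar ++ ["1"])
      else
        (if c % 2 == 0 then colpar ++ ["0"] else colpar ++ ["1"])) ([] : List String)
    = (PySem.List.pyRange 0 l 1).map (fun i => pvBit p (pvCnt data i % 2 == 1)) := by
  have hfun : (fun (colpar : List String) (i : Int) =>
      let c := data.foldl (fun c j => if PySem.List.pyGetD j i "" == "1" then c + 1 else c) (0 : Int)
      if p == 1 then
        (if c % 2 == 1 then colpar ++ ["0"] else colpar ++ ["1"])
      else
        (if c % 2 == 0 then colpar ++ ["0"] else colpar ++ ["1"]))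
      = fun colpar i => colpar ++ [pvBit p (pvCnt data i % 2 == 1)] := by
    funext colpar i
    have h : pvCnt data i % 2 = 0 ∨ pvCnt data i % 2 = 1 := by omega
    simp only [pvBit, pvCnt]
    rcases h with h | h <;> split_ifs with h1 h2 <;> simp_all <;> omega
  rw [hfun, PySem.List.foldl_append_singleton_eq_map]
  simp

-- count-parity of A's inner loop equals B's XOR accumulation, column by column
lemma cnt_parity (data : List (List String)) (k : Nat) :
    ∀ (c : Int) (b : Bool), (c % 2 = 1 ↔ b = true) →
    ((data.foldl (fun c j => if PySem.List.pyGetD j (k : Int) "" == "1" then c + 1 else c) c) % 2 = 1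
      ↔ pvXor data k b = true) := by
  induction data with
  | nil => intro c b h; simpa [pvXor] using h
  | cons row rest ih =>
    intro c b h
    simp only [pvXor, List.foldl_cons] at ih ⊢
    have hpg : PySem.List.pyGetD row ((k : Nat) : Int) "" = row.getD k "" := by simp
    rw [hpg]
    by_cases hr : row.getD k "" = "1"
    · have hb : (row.getD k "" == "1") = true := by simpa using hr
      rw [hb, if_pos rfl]
      exact ih (c + 1) (b != true) (by cases b <;> simp_all <;> omega)
    · have hb : (row.getD k "" == "1") = false := by simpa using hr
      rw [hb, if_neg (by simp)]
      exact ih c (b != false) (by cases b <;> simp_all)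

-- B's single row pass unrolled into a per-column description
lemma par_eq_map (data : List (List String)) :
    ∀ (acc : List Bool), (∀ row ∈ data, acc.length ≤ row.length) →
    data.foldl (fun par row => List.zipWith (fun x ch => x != (ch == "1")) par row) acc
    = (List.range acc.length).map (fun k => pvXor data k (acc.getD k false)) := by
  induction data with
  | nil =>
    intro acc _
    apply List.ext_getElem (by simp)
    intro k h1 h2
    simp only [List.foldl_nil, List.getElem_map, List.getElem_range, pvXor]
    rw [List.getD_eq_getElem acc false (by simpa using h2)]
  | cons row rest ih =>
    intro acc hlen
    have hrow : acc.length ≤ row.length := hlen row (by simp)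
    have hzl : (List.zipWith (fun (x : Bool) (ch : String) => x != (ch == "1")) acc row).length
        = acc.length := by simp [Nat.min_eq_left hrow]
    simp only [List.foldl_cons]
    rw [ih _ (by intro r hr; rw [hzl]; exact hlen r (by simp [hr])), hzl]
    apply List.map_congr_left
    intro k hk
    have hk' : k < acc.length := List.mem_range.mp hk
    have hk2 : k < row.length := lt_of_lt_of_le hk' hrow
    have hg : (List.zipWith (fun (x : Bool) (ch : String) => x != (ch == "1")) acc row).getD k false
        = (acc.getD k false != (row.getD k "" == "1")) := by
      rw [List.getD_eq_getElem _ false (by omega), List.getElem_zipWith,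
        List.getD_eq_getElem acc false hk', List.getD_eq_getElem row "" hk2]
    rw [hg]
    simp [pvXor]

-- the two column-parity rows coincide
lemma colpar_agree (data : List (List String)) (l p : Int)
    (hpre : ∀ row ∈ data, l ≤ (row.length : Int)) :
    (PySem.List.pyRange 0 l 1).map (fun i => pvBit p (pvCnt data i % 2 == 1))
    = (data.foldl (fun par row => List.zipWith (fun x ch => x != (ch == "1")) par row)
        (List.replicate (max l 0).toNat false)).map (pvBit p) := by
  have hn : (max l 0).toNat = l.toNat := by omega
  rw [par_eq_map data (List.replicate (max l 0).toNat false)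
      (by intro r hr; have := hpre r hr; simp only [List.length_replicate]; omega)]
  rw [PySem.List.pyRange_one]
  simp only [List.length_replicate, hn, List.map_map, Int.sub_zero]
  apply List.map_congr_left
  intro k hk
  have hk' : k < l.toNat := List.mem_range.mp hk
  have hgd : (List.replicate l.toNat false).getD k false = false :=
    List.getD_replicate false hk'
  simp only [Function.comp_apply, zero_add]
  rw [hgd]
  have hpar := cnt_parity data k 0 false (by simp)
  congr 1
  rcases hxb : pvXor data k false
  · rw [hxb] at hpar; simp only [Bool.false_eq_true, iff_false] at hpar
    simpa [pvCnt] using hpar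
  · rw [hxb] at hpar; simp only [iff_true] at hpar
    simpa [pvCnt] using hpar

theorem double_par_spec : Claim_equal_double_par := by
  intro data l p _ hpre
  show double_par data l p = double_par_alt data l p
  simp only [double_par, double_par_alt, singel_par_eq, acolpar_eq_map]
  rw [colpar_agree data l p hpre]
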